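-- pv_equiv track=rewrite | github.com/djoerd/snipdex | snipdex/sender.py | reduce_tuple
-- ===== SOURCE A (Python) =====
-- def reduce_tuple(my_tuple):
--     result = []
--     partial = []
--     try:
--         for i in my_tuple:
--             partial.append(i)
--             if i:
--                 result = partial[:] # copy list
--     except TypeError:
--         return my_tuple
--     if result:
--         return tuple(result)
--     else:
--         return None
-- ===== SOURCE B (Python) =====
-- def reduce_tuple(my_tuple):
--     try:
--         items = list(my_tuple)
--     except TypeError:
--         return my_tuple
--     for idx in range(len(items) - 1, -1, -1):
--         if items[idx]:
--             return tuple(items[:idx + 1])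
--     return None
-- ===== Notes on version B (the rewrite author's own statement) =====
-- stated objective: simpler
-- what changed: A accumulates forward and copies the partial list on every truthy element; B scans once from the tail and returns the prefix at the first truthy element found, with no copying in the loop.
import Mathlib
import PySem

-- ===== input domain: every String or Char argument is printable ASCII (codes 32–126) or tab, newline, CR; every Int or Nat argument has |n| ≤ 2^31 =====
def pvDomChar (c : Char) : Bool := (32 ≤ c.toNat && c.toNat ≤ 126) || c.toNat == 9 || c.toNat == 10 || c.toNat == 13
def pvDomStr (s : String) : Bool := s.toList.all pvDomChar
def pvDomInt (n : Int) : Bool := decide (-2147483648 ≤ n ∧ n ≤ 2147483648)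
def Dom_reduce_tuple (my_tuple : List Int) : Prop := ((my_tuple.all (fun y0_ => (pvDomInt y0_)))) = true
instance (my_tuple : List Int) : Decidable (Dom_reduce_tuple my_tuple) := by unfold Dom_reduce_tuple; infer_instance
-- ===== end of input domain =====

-- B replaces A's forward accumulate-and-copy with a single tail-first early-exit scan (simpler, no per-element list copies).


-- ===== PORT A =====
-- A: foldl carrying (result, partial); partial appends each element, result is a copy
-- of partial after each truthy element; final: tuple(result) if result truthy else None.
-- (The 'except TypeError' branch is unreachable for a List Int argument.)
def reduce_tuple (my_tuple : List Int) : Option (List Int) :=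
  let st := my_tuple.foldl
    (fun (st : List Int × List Int) i =>
      let part := st.2 ++ [i]
      if i ≠ 0 then (part, part) else (st.1, part))
    ([], [])
  if st.1 ≠ [] then some st.1 else none

-- ===== PORT B =====
-- B's backward loop: altScan items k inspects indices k-1, k-2, …, 0 and returns
-- items[:idx+1] at the first truthy items[idx]; none when the loop completes.
def altScan (items : List Int) : Nat → Option (List Int)
  | 0 => none
  | k+1 => if items.getD k 0 ≠ 0 then some (items.take (k+1)) else altScan items k

def reduce_tuple_alt (my_tuple : List Int) : Option (List Int) :=
  altScan my_tuple my_tuple.length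

-- ===== PRECONDITION & SPEC =====
def Spec_reduce_tuple (my_tuple : List Int) (out : Option (List Int)) : Prop := out = reduce_tuple_alt my_tuple
instance (my_tuple : List Int) (out : Option (List Int)) : Decidable (Spec_reduce_tuple my_tuple out) := by unfold Spec_reduce_tuple; infer_instance

-- ===== CLAIM (what is proved, stated in full; the proofs are below) =====
def Claim_equal_reduce_tuple : Prop := ∀ (my_tuple : List Int), Dom_reduce_tuple my_tuple → Spec_reduce_tuple my_tuple (reduce_tuple my_tuple)

-- ===== LEMMAS AND PROOFS =====

-- Common characterisation: the prefix of l up to its last nonzero element, if any.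
def lastPrefix : List Int → Option (List Int)
  | [] => none
  | x :: t =>
    match lastPrefix t with
    | some u => some (x :: u)
    | none => if x ≠ 0 then some [x] else none

theorem lastPrefix_ne_nil (l : List Int) : lastPrefix l ≠ some [] := by
  induction l with
  | nil => simp [lastPrefix]
  | cons x t ih =>
    simp only [lastPrefix]
    cases h : lastPrefix t with
    | some u => simp
    | none => split <;> simp

theorem foldA_eq (l : List Int) : ∀ (r p : List Int),
    l.foldl (fun (st : List Int × List Int) i =>
      let part := st.2 ++ [i]
      if i ≠ 0 then (part, part) else (st.1, part)) (r, p)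
    = ((match lastPrefix l with | some u => p ++ u | none => r), p ++ l) := by
  induction l with
  | nil => intro r p; simp [lastPrefix]
  | cons x t ih =>
    intro r p
    simp only [List.foldl, lastPrefix]
    by_cases hx : x = 0
    · simp only [hx]
      rw [show ((if (0:Int) ≠ 0 then (p ++ [(0:Int)], p ++ [0]) else (r, p ++ [0])) = (r, p ++ [(0:Int)])) by simp]
      rw [ih r (p ++ [0])]
      cases h : lastPrefix t <;> simp
    · rw [show ((if x ≠ 0 then (p ++ [x], p ++ [x]) else (r, p ++ [x])) = (p ++ [x], p ++ [x])) by simp [hx]]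
      rw [ih (p ++ [x]) (p ++ [x])]
      cases h : lastPrefix t with
      | some u => simp
      | none => simp [hx]

theorem lastPrefix_append_single (l : List Int) (x : Int) :
    lastPrefix (l ++ [x]) = if x ≠ 0 then some (l ++ [x]) else lastPrefix l := by
  induction l with
  | nil => simp [lastPrefix]
  | cons y t ih =>
    simp only [List.cons_append, lastPrefix, ih]
    by_cases hx : x = 0
    · simp only [hx]
      cases h : lastPrefix t <;> simp
    · simp [hx]

theorem altScan_eq (xs : List Int) : ∀ k, k ≤ xs.length →
    altScan xs k = lastPrefix (xs.take k) := by
  intro k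
  induction k with
  | zero => intro _; simp [altScan, lastPrefix]
  | succ k ih =>
    intro hk
    have hklt : k < xs.length := by omega
    have htake : xs.take (k+1) = xs.take k ++ [xs.getD k 0] := by
      rw [List.take_add_one, List.getElem?_eq_getElem hklt, List.getD_eq_getElem _ _ hklt,
        Option.toList_some]
    simp only [altScan, htake, lastPrefix_append_single, ih (by omega)]

theorem reduce_tuple_spec : Claim_equal_reduce_tuple := by
  intro xs _
  unfold Spec_reduce_tuple reduce_tuple reduce_tuple_alt
  rw [altScan_eq xs xs.length (le_refl _), List.take_length]
  have := foldA_eq xs [] []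
  simp only [List.nil_append] at this
  rw [this]
  cases h : lastPrefix xs with
  | none => simp
  | some u =>
    have hu : u ≠ [] := by
      intro hnil; exact lastPrefix_ne_nil xs (hnil ▸ h)
    simp [hu]
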